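-- pv_equiv track=rewrite | github.com/SirArchy/CoMa-1 | fertige Aufgaben/CoMa_Proggen_HA7.py | extractSquare
-- ===== SOURCE A (Python) =====
-- def sortPositions(positions):
--     """
--     input:
--     positions: Liste mit allen Positionen der Figuren
--
--     output:
--     pos: aufsteigend nach den zweiten Einträgen der Teillisten sortierte Liste mit Positionen
--     """
--     positions.sort(key=lambda x: x[1])
--
-- def extractSquare(positions):
--     """
--     input:
--     positions: Liste mit allen Positionen der Figuren
--
--     output:
--     pos: alle Figuren auf dem Feld mit dem höchsten Index in positions
--     """
--     sortPositions(positions)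
--     square = [positions[-1]] #letzten Eintrag von positions an square anfügen
--     del positions[-1]
--     for i in reversed(positions): #von hinten durch die Liste iterieren
--         if i[1] == square[0][1]:
--             square.insert(0, i)
--             del positions[-1]
--             if len(positions) == 0:
--                 break
--         else:
--             break
--     return (positions,square)
-- ===== SOURCE B (Python) =====
-- def extractSquare(positions):
--     # Sort in place by second coordinate, then partition the whole sorted list
--     # by "second coordinate == that of the last element" with two comprehensions.
--     positions.sort(key=lambda x: x[1])
--     m = positions[-1][1]
--     square = [p for p in positions if p[1] == m]
--     rest = [p for p in positions if p[1] != m]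
--     positions[:] = rest
--     return (positions, square)
-- ===== Notes on version B (the rewrite author's own statement) =====
-- stated objective: simpler
-- what changed: A pops elements off the end of the sorted list in a reverse scan with breaks; B reads the maximal second coordinate from the sorted list's last element and partitions the whole list with two predicate comprehensions.
import Mathlib
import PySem

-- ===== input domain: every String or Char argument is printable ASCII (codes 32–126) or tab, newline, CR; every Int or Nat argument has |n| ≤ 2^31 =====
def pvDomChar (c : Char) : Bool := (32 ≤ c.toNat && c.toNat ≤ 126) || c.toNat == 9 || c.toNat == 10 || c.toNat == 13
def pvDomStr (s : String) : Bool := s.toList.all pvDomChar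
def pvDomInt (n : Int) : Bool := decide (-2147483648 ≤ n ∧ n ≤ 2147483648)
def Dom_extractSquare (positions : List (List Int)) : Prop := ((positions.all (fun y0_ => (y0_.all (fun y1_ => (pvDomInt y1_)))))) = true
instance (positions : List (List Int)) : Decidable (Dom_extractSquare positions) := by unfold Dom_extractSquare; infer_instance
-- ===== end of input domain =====

-- B sorts then partitions the sorted list with two predicate comprehensions instead of A's
-- reverse tail-scan with break; equivalence is about the RETURN value (both also mutate
-- `positions` in place to the same final list).

-- the sort key lambda x: x[1] used by both versions
def pvKey (p : List Int) : Int := PySem.List.pyGetD p 1 0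

-- ===== PORT A =====
-- the for-loop over reversed(positions) with del positions[-1]: `rev` is the reversed
-- remaining list, `square` the accumulator; break returns (positions, square)
def extractSquareLoop (rev square : List (List Int)) : List (List Int) × List (List Int) :=
  match rev, square with
  | [], sq => ([], sq)
  | i :: rest, s :: sq' =>
      if pvKey i == pvKey s then
        extractSquareLoop rest (i :: s :: sq')
      else ((i :: rest).reverse, s :: sq')
  | r, [] => (r.reverse, [])   -- unreachable: square starts nonempty and only grows

def extractSquare (positions : List (List Int)) : List (List Int) × List (List Int) :=
  let pos := PySem.List.sorted positions pvKey false   -- sortPositions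
  let square := [PySem.List.pyGetD pos (-1) []]        -- square = [positions[-1]]
  let pos := pos.dropLast                              -- del positions[-1]
  extractSquareLoop pos.reverse square

-- ===== PORT B =====
def extractSquare_alt (positions : List (List Int)) : List (List Int) × List (List Int) :=
  let s := PySem.List.sorted positions pvKey false
  let m := pvKey (PySem.List.pyGetD s (-1) [])
  let square := s.filter (fun p => pvKey p == m)
  let rest := s.filter (fun p => pvKey p != m)
  (rest, square)

-- ===== PRECONDITION & SPEC =====
-- A raises IndexError on the empty list (positions[-1]) and whenever some position has
-- fewer than 2 entries (the sort key x[1]); exactly those inputs are excluded.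
def Pre_extractSquare (positions : List (List Int)) : Prop :=
  positions ≠ [] ∧ ∀ p ∈ positions, 2 ≤ p.length
instance (positions : List (List Int)) : Decidable (Pre_extractSquare positions) := by
  unfold Pre_extractSquare; infer_instance
def pvWitness_extractSquare : List (List Int) := [[0, 1], [2, 3], [4, 3]]

def Spec_extractSquare (positions : List (List Int)) (out : List (List Int) × List (List Int)) : Prop := out = extractSquare_alt positions
instance (positions : List (List Int)) (out : List (List Int) × List (List Int)) : Decidable (Spec_extractSquare positions out) := by unfold Spec_extractSquare; infer_instance

-- ===== CLAIM (what is proved, stated in full; the proofs are below) =====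
def Claim_equal_extractSquare : Prop := ∀ (positions : List (List Int)), Dom_extractSquare positions → Pre_extractSquare positions → Spec_extractSquare positions (extractSquare positions)

-- ===== LEMMAS AND PROOFS =====

-- the tail-pop loop consumes exactly the maximal run of key-m elements at the front of `rev`
lemma loop_eq (m : Int) (ys : List (List Int)) :
    ∀ zs s sq, pvKey s = m → (∀ y ∈ ys, pvKey y = m) →
    (∀ h : zs ≠ [], pvKey (zs.head h) ≠ m) →
    extractSquareLoop (ys ++ zs) (s :: sq) = (zs.reverse, ys.reverse ++ s :: sq) := by
  induction ys with
  | nil =>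
      intro zs s sq hs _ hz
      cases zs with
      | nil => simp [extractSquareLoop]
      | cons z zt =>
          have : ¬ (pvKey z == pvKey s) := by
            simpa [hs] using hz (by simp)
          simp [extractSquareLoop, this]
  | cons y yt ih =>
      intro zs s sq hs hy hz
      have hym : pvKey y = m := hy y (by simp)
      simp only [List.cons_append, extractSquareLoop]
      rw [if_pos (by simp [hym, hs])]
      rw [ih zs y (s :: sq) hym (fun q hq => hy q (by simp [hq])) hz]
      simp

theorem extractSquare_spec : Claim_equal_extractSquare := by
  intro positions _ hpre
  unfold Spec_extractSquare extractSquare extractSquare_alt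
  set s := PySem.List.sorted positions pvKey false with hsdef
  have hsne : s ≠ [] := by
    have : s.length = positions.length := PySem.List.length_sorted ..
    intro h; rw [h] at this; exact hpre.1 (List.eq_nil_of_length_eq_zero this.symm)
  have hpw : s.Pairwise (fun a b => pvKey a ≤ pvKey b) := PySem.List.sorted_pairwise ..
  -- name the last element
  have hlast : PySem.List.pyGetD s (-1) ([] : List Int) = s.getLast hsne :=
    PySem.List.pyGetD_neg_one s [] hsne
  set a := s.getLast hsne with hadef
  set m := pvKey a with hmdef
  have hsplit : s = s.dropLast ++ [a] := (List.dropLast_append_getLast hsne).symm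
  -- every element of dropLast has key ≤ m
  have hle : ∀ p ∈ s.dropLast, pvKey p ≤ m := by
    intro p hp
    have := hpw
    rw [hsplit] at this
    have h2 := (List.pairwise_append.mp this).2.2
    exact h2 p hp a (by simp)
  -- split dropLast at the predicate
  set pre := s.dropLast.takeWhile (fun p => !(pvKey p == m)) with hpredef
  set suf := s.dropLast.dropWhile (fun p => !(pvKey p == m)) with hsufdef
  have hds : s.dropLast = pre ++ suf := (List.takeWhile_append_dropWhile).symm
  have hprem : ∀ p ∈ pre, pvKey p ≠ m := by
    intro p hp
    have := List.mem_takeWhile_imp hp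
    simpa using this
  have hsufm : ∀ p ∈ suf, pvKey p = m := by
    cases hsuf : suf with
    | nil => simp
    | cons h t =>
        intro p hp
        have hh : pvKey h = m := by
          have hdw : List.dropWhile (fun p => !(pvKey p == m)) s.dropLast = h :: t :=
            hsufdef.symm.trans hsuf
          have := List.head_dropWhile_not (fun p => !(pvKey p == m)) (l := s.dropLast)
              (by rw [hdw]; simp)
          have hhd : (List.dropWhile (fun p => !(pvKey p == m)) s.dropLast).head
              (by rw [hdw]; simp) = h := by
            simp [hdw]
          rw [hhd] at this
          simpa using this
        have hsub : suf.Sublist s.dropLast := List.dropWhile_sublist _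
        have hpwsuf : suf.Pairwise (fun a b => pvKey a ≤ pvKey b) := by
          have : s.dropLast.Pairwise (fun a b => pvKey a ≤ pvKey b) := by
            rw [hsplit] at hpw
            exact (List.pairwise_append.mp hpw).1
          exact this.sublist hsub
        rw [hsuf] at hpwsuf
        rcases List.mem_cons.mp hp with rfl | hp
        · exact hh
        · have h1 : pvKey h ≤ pvKey p := (List.pairwise_cons.mp hpwsuf).1 p hp
          have h2 : pvKey p ≤ m := hle p (hsub.mem (by rw [hsuf]; simp [hp]))
          omega
  -- compute both sides
  have hA : extractSquareLoop s.dropLast.reverse [PySem.List.pyGetD s (-1) []]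
      = (pre, suf ++ [a]) := by
    rw [hlast, hds, List.reverse_append]
    rw [loop_eq m suf.reverse pre.reverse a [] hmdef.symm
        (by intro y hy; exact hsufm y (List.mem_reverse.mp hy))
        (by
          intro h
          have hmem : pre.reverse.head h ∈ pre.reverse := List.head_mem h
          exact hprem _ (List.mem_reverse.mp hmem))]
    simp
  have hfilter1 : s.filter (fun p => pvKey p == m) = suf ++ [a] := by
    rw [hsplit, hds, List.filter_append, List.filter_append]
    rw [List.filter_eq_nil_iff.mpr (by intro p hp; simpa using hprem p hp)]
    rw [List.filter_eq_self.mpr (by intro p hp; simpa using hsufm p hp)]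
    simp [← hmdef]
  have hfilter2 : s.filter (fun p => pvKey p != m) = pre := by
    rw [hsplit, hds, List.filter_append, List.filter_append]
    rw [List.filter_eq_self.mpr (by intro p hp; simpa using hprem p hp)]
    rw [List.filter_eq_nil_iff.mpr (by intro p hp; simpa using hsufm p hp)]
    simp [← hmdef]
  rw [hA]
  show (pre, suf ++ [a]) = (List.filter (fun p => pvKey p != pvKey (PySem.List.pyGetD s (-1) [])) s,
      List.filter (fun p => pvKey p == pvKey (PySem.List.pyGetD s (-1) [])) s)
  rw [hlast, ← hmdef, hfilter1, hfilter2]
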